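-- pv_equiv track=rewrite | github.com/piyush4793/codechef-piyush | april-2020/squared_subsequences.py | solve
-- ===== SOURCE A (Python) =====
-- def sum_n_nums(n):
--     if n%2==0:
--         return (n+1)*(n//2)
--     return n*((n+1)//2)
--
-- def solve(n, arr):
--
--     # 1 -> odd, 2-> 2, 4 -> 4*k (mutiple of 4)
--
--     tracker = [None]*n
--     left_odd = 0 # odd to left of two -> only to keep track of consecutive odd numbers left of two
--     for i in range(n):
--         if arr[i]%4==0:
--             tracker[i] = [4, 0, 0]
--             left_odd = 0
--         elif arr[i]%2==0:
--             tracker[i] = [2, left_odd, 0]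
--             left_odd = 0
--         else:
--             tracker[i] = [1, 0, 0]
--             left_odd += 1
--
--     right_odd = 0
--     for i in range(n-1, -1, -1):
--         if tracker[i][0] == 4:
--             right_odd = 0
--         elif tracker[i][0] == 2:
--             tracker[i][2] = right_odd
--             right_odd = 0
--         else:
--             right_odd += 1
--
--     total_subsequence = sum_n_nums(n)
--
--     for i in range(n):
--         if tracker[i][0] == 2:
--             temp_sequence_size = tracker[i][1] + tracker[i][2] + 1
--             total_subsequence -= sum_n_nums(temp_sequence_size)
--             total_subsequence += sum_n_nums(tracker[i][1]) + sum_n_nums(tracker[i][2])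
--
--     return total_subsequence
-- ===== SOURCE B (Python) =====
-- def solve(n, arr):
--     # one forward pass: keep current odd-run length and the pending %4==2 element's
--     # left-odd count; close each pending with (left+1)*(right+1) at the next even / end
--     total = n * (n + 1) // 2
--     run = 0
--     pending = None
--     for i in range(n):
--         x = arr[i]
--         if x % 2 != 0:
--             run += 1
--         else:
--             if pending is not None:
--                 total -= (pending + 1) * (run + 1)
--             pending = run if x % 4 != 0 else None
--             run = 0
--     if pending is not None:
--         total -= (pending + 1) * (run + 1)
--     return total
-- ===== Notes on version B (the rewrite author's own statement) =====
-- stated objective: simpler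
-- what changed: A's tracker array, backward right-odd pass and triangular-number inclusion-exclusion are replaced by a single forward pass that keeps the current odd-run length and one pending even element, subtracting the closed-form product (left+1)*(right+1) directly.
import Mathlib
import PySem

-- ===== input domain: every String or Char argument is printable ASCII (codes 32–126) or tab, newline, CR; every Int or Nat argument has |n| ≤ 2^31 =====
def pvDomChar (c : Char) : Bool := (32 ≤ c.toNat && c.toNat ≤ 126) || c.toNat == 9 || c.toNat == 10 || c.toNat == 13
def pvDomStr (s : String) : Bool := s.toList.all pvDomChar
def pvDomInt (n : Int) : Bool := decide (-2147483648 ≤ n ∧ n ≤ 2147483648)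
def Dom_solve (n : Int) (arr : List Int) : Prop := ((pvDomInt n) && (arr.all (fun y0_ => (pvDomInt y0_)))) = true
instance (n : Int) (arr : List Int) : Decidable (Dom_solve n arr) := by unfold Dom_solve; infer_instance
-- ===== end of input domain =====

-- B replaces A's tracker array, backward pass and triangular-number inclusion-exclusion by a
-- single forward pass with a pending counter and the closed-form product (l+1)*(r+1) (simpler).

-- ===== PORT A =====
def sum_n_nums (m : Int) : Int :=
  if PySem.Int.mod m 2 = 0 then (m + 1) * (PySem.Int.floordiv m 2)
  else m * (PySem.Int.floordiv (m + 1) 2)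

-- first loop of A: build tracker with the left-odd counts (iterates the first n elements)
def pass1 : Int → List Int → List (Int × Int × Int)
  | _, [] => []
  | leftOdd, x :: xs =>
    if PySem.Int.mod x 4 = 0 then (4, 0, 0) :: pass1 0 xs
    else if PySem.Int.mod x 2 = 0 then (2, leftOdd, 0) :: pass1 0 xs
    else (1, 0, 0) :: pass1 (leftOdd + 1) xs

-- second loop of A: backward pass filling in the right-odd counts (returns final right_odd)
def pass2 : List (Int × Int × Int) → List (Int × Int × Int) × Int
  | [] => ([], 0)
  | e :: rest =>
    let pr := pass2 rest
    if e.1 = 4 then (e :: pr.1, 0)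
    else if e.1 = 2 then ((e.1, e.2.1, pr.2) :: pr.1, 0)
    else (e :: pr.1, pr.2 + 1)

-- third loop of A: subtract/add the triangular numbers per '2'-entry
def pass3 : Int → List (Int × Int × Int) → Int
  | total, [] => total
  | total, e :: rest =>
    if e.1 = 2 then
      pass3 (total - sum_n_nums (e.2.1 + e.2.2 + 1)
                   + (sum_n_nums e.2.1 + sum_n_nums e.2.2)) rest
    else pass3 total rest

def solve (n : Int) (arr : List Int) : Int :=
  let tracker := (pass2 (pass1 0 (arr.take n.toNat))).1
  pass3 (sum_n_nums n) tracker

-- ===== PORT B =====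
-- state: (running total, current odd-run length, pending left count of an unclosed %4==2 element)
def bstep (st : Int × Int × Option Int) (x : Int) : Int × Int × Option Int :=
  if PySem.Int.mod x 2 ≠ 0 then (st.1, st.2.1 + 1, st.2.2)
  else
    let t :=
      match st.2.2 with
      | some l => st.1 - (l + 1) * (st.2.1 + 1)
      | none => st.1
    (t, 0, if PySem.Int.mod x 4 ≠ 0 then some st.2.1 else none)

def solve_alt (n : Int) (arr : List Int) : Int :=
  let st := (arr.take n.toNat).foldl bstep (PySem.Int.floordiv (n * (n + 1)) 2, 0, none)
  match st.2.2 with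
  | some l => st.1 - (l + 1) * (st.2.1 + 1)
  | none => st.1

-- ===== PRECONDITION & SPEC =====
-- A indexes arr[i] for i in range(n): it raises IndexError exactly when n > len(arr).
def Pre_solve (n : Int) (arr : List Int) : Prop := n ≤ (arr.length : Int)
instance (n : Int) (arr : List Int) : Decidable (Pre_solve n arr) := by unfold Pre_solve; infer_instance
def pvWitness_solve : Int × List Int := (4, [3, 2, 5, 8])

def Spec_solve (n : Int) (arr : List Int) (out : Int) : Prop := out = solve_alt n arr
instance (n : Int) (arr : List Int) (out : Int) : Decidable (Spec_solve n arr out) := by unfold Spec_solve; infer_instance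

-- ===== CLAIM (what is proved, stated in full; the proofs are below) =====
def Claim_equal_solve : Prop := ∀ (n : Int) (arr : List Int), Dom_solve n arr → Pre_solve n arr → Spec_solve n arr (solve n arr)

-- ===== LEMMAS AND PROOFS =====

-- 2 * sum_n_nums m = m * (m + 1), for every integer m
theorem two_mul_snn (m : Int) : 2 * sum_n_nums m = m * (m + 1) := by
  unfold sum_n_nums
  rw [PySem.Int.floordiv_eq_ediv_of_pos (by norm_num), PySem.Int.floordiv_eq_ediv_of_pos (by norm_num)]
  split_ifs with h
  · rw [PySem.Int.mod_eq_zero_iff_dvd] at h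
    obtain ⟨k, hk⟩ := h
    subst hk
    rw [Int.mul_ediv_cancel_left _ (by norm_num)]
    ring
  · rw [PySem.Int.mod_eq_zero_iff_dvd] at h
    obtain ⟨k, hk⟩ : (2:Int) ∣ (m + 1) := by omega
    rw [hk, Int.mul_ediv_cancel_left _ (by norm_num)]
    have hm : m = 2 * k - 1 := by omega
    rw [hm]
    ring

-- length of the leading odd run
def leadOdd : List Int → Int
  | [] => 0
  | x :: xs => if PySem.Int.mod x 2 = 0 then 0 else leadOdd xs + 1

def closeP : Option Int → Int → Int
  | some l, r => (l + 1) * (r + 1)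
  | none, _ => 0

-- the total deduction, computed the way B walks the list
def ded : Int → Option Int → List Int → Int
  | run, p, [] => closeP p run
  | run, p, x :: xs =>
    if PySem.Int.mod x 2 ≠ 0 then ded (run + 1) p xs
    else closeP p run + ded 0 (if PySem.Int.mod x 4 ≠ 0 then some run else none) xs

-- the deduction A's third loop realises, summed over the tracker
def dedA : List (Int × Int × Int) → Int
  | [] => 0
  | e :: rest =>
    (if e.1 = 2 then
      sum_n_nums (e.2.1 + e.2.2 + 1) - sum_n_nums e.2.1 - sum_n_nums e.2.2
     else 0) + dedA rest

theorem pass3_eq (tr : List (Int × Int × Int)) : ∀ t : Int, pass3 t tr = t - dedA tr := by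
  induction tr with
  | nil => intro t; simp [pass3, dedA]
  | cons e rest ih =>
    intro t
    by_cases h : e.1 = 2 <;> simp [pass3, dedA, h, ih] <;> ring

theorem ded_tri (l r : Int) :
    sum_n_nums (l + r + 1) - sum_n_nums l - sum_n_nums r = (l + 1) * (r + 1) := by
  have h : 2 * (sum_n_nums (l + r + 1) - sum_n_nums l - sum_n_nums r) = 2 * ((l + 1) * (r + 1)) := by
    rw [mul_sub, mul_sub, two_mul_snn, two_mul_snn, two_mul_snn]
    ring
  linarith

theorem ded_pending (xs : List Int) : ∀ r l : Int,
    ded r (some l) xs = (l + 1) * (r + leadOdd xs + 1) + ded r none xs := by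
  induction xs with
  | nil => intro r l; simp [ded, closeP, leadOdd]
  | cons x xs ih =>
    intro r l
    by_cases hx : (2:Int) ∣ x
    · have hm : ¬ x % 2 = 1 := by omega
      have hmod : PySem.Int.mod x 2 = 0 := by rw [PySem.Int.mod_eq_zero_iff_dvd]; exact hx
      simp [ded, leadOdd, closeP, hx, hm, hmod]
    · have hm : x % 2 = 1 := by omega
      have hmod : ¬ PySem.Int.mod x 2 = 0 := by rw [PySem.Int.mod_eq_zero_iff_dvd]; exact hx
      simp [ded, leadOdd, closeP, hx, hm, hmod, ih]
      exact Or.inl (by ring)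

theorem passes_eq (xs : List Int) : ∀ l : Int,
    dedA (pass2 (pass1 l xs)).1 = ded l none xs ∧ (pass2 (pass1 l xs)).2 = leadOdd xs := by
  induction xs with
  | nil => intro l; simp [pass1, pass2, dedA, ded, leadOdd, closeP]
  | cons x xs ih =>
    intro l
    by_cases h4 : (4:Int) ∣ x
    · have h2 : (2:Int) ∣ x := dvd_trans (by norm_num) h4
      have hm : ¬ x % 2 = 1 := by omega
      simp [pass1, pass2, dedA, ded, leadOdd, closeP, h4, h2, hm, (ih 0).1, (ih 0).2]
    · by_cases h2 : (2:Int) ∣ x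
      · have hm : ¬ x % 2 = 1 := by omega
        simp [pass1, pass2, dedA, ded, leadOdd, closeP, h4, h2, hm, (ih 0).1, (ih 0).2,
              ded_tri, ded_pending]
      · have hm : x % 2 = 1 := by omega
        simp [pass1, pass2, dedA, ded, leadOdd, closeP, h4, h2, hm,
              (ih (l + 1)).1, (ih (l + 1)).2]

theorem bfold_eq (xs : List Int) : ∀ (t l : Int) (p : Option Int),
    (match (xs.foldl bstep (t, l, p)).2.2 with
     | some L => (xs.foldl bstep (t, l, p)).1 - (L + 1) * ((xs.foldl bstep (t, l, p)).2.1 + 1)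
     | none => (xs.foldl bstep (t, l, p)).1) = t - ded l p xs := by
  induction xs with
  | nil =>
    intro t l p
    cases p <;> simp [ded, closeP]
  | cons x xs ih =>
    intro t l p
    by_cases hx : (2:Int) ∣ x
    · have hm : ¬ x % 2 = 1 := by omega
      have hmod : PySem.Int.mod x 2 = 0 := by rw [PySem.Int.mod_eq_zero_iff_dvd]; exact hx
      cases p <;> simp [List.foldl_cons, bstep, hmod, ih, ded, closeP, hm] <;> ring
    · have hm : x % 2 = 1 := by omega
      have hmod : ¬ PySem.Int.mod x 2 = 0 := by rw [PySem.Int.mod_eq_zero_iff_dvd]; exact hx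
      simp [List.foldl_cons, bstep, hmod, ih, ded, hm]

theorem total_eq (n : Int) : sum_n_nums n = PySem.Int.floordiv (n * (n + 1)) 2 := by
  have h := two_mul_snn n
  obtain ⟨k, hk⟩ : (2:Int) ∣ n * (n + 1) := (Int.even_mul_succ_self n).two_dvd
  rw [PySem.Int.floordiv_eq_ediv_of_pos (by norm_num), hk,
      Int.mul_ediv_cancel_left _ (by norm_num)]
  rw [hk] at h
  omega

-- ===== VERDICT (by name: the statement is the Claim_ definition above) =====
theorem solve_spec : Claim_equal_solve := by
  intro n arr _ _
  unfold Spec_solve solve solve_alt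
  rw [pass3_eq, (passes_eq (arr.take n.toNat) 0).1, bfold_eq, total_eq]
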